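-- pv_equiv track=rewrite | github.com/gnana-akhil/slv | logic_minimizer.py | get_covered_terms
-- ===== SOURCE A (Python) =====
-- import itertools
--
-- def get_covered_terms(implicant, num_inputs):
--     wildcards = [pos for pos, char in enumerate(implicant) if char == '-']
--     fixed = list(implicant)
--     combos = []
--     for bits in itertools.product('01', repeat=len(wildcards)):
--         for i, b in zip(wildcards, bits):
--             fixed[i] = b
--         combos.append(''.join(fixed))
--     return combos
-- ===== SOURCE B (Python) =====
-- def get_covered_terms(implicant, num_inputs):
--     partials = ['']
--     for ch in implicant:
--         if ch == '-':
--             partials = [p + b for p in partials for b in '01']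
--         else:
--             partials = [p + ch for p in partials]
--     return partials
-- ===== Notes on version B (the rewrite author's own statement) =====
-- stated objective: simpler
-- what changed: Single left-to-right pass that doubles a list of partial strings at each wildcard, instead of collecting wildcard positions and enumerating an itertools.product with in-place substitution.
import Mathlib
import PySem

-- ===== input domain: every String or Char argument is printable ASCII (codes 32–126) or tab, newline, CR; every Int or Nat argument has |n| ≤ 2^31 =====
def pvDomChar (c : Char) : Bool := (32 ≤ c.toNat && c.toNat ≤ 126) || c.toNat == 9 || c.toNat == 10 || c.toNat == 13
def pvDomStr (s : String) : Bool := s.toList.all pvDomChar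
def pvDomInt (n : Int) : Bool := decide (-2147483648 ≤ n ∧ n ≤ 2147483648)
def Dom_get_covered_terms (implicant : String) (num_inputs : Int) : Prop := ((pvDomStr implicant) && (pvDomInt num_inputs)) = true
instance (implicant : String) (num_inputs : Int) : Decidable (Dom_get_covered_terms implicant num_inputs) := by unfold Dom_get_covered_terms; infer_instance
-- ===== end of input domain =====

-- B replaces A's wildcard-position collection + itertools.product enumeration with a single
-- left-to-right pass that doubles a list of partial strings at each '-' (objective: simpler).

-- ===== PORT A =====
-- port of itertools.product('01', repeat=n): first coordinate varies slowest
def productBits : Nat → List (List Char)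
  | 0 => [[]]
  | n + 1 => ['0', '1'].flatMap (fun b => (productBits n).map (b :: ·))

def get_covered_terms (implicant : String) (num_inputs : Int) : List String :=
  let wildcards : List Int := (PySem.List.enumerate implicant.toList 0).filterMap
      (fun pc => if pc.2 = '-' then some pc.1 else none)
  let fixed : List Char := implicant.toList
  let res := (productBits wildcards.length).foldl
      (fun (st : List Char × List String) bits =>
        let f := (wildcards.zip bits).foldl (fun f ib => PySem.List.pySetD f ib.1 ib.2) st.1
        (f, st.2 ++ [String.mk f]))
      (fixed, [])
  res.2

-- ===== PORT B =====
def get_covered_terms_alt (implicant : String) (num_inputs : Int) : List String :=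
  let partials := implicant.toList.foldl
      (fun (ps : List (List Char)) c =>
        if c = '-' then ps.flatMap (fun p => [p ++ ['0'], p ++ ['1']])
        else ps.map (fun p => p ++ [c]))
      [[]]
  partials.map String.mk

-- ===== PRECONDITION & SPEC =====
def Spec_get_covered_terms (implicant : String) (num_inputs : Int) (out : List String) : Prop := out = get_covered_terms_alt implicant num_inputs
instance (implicant : String) (num_inputs : Int) (out : List String) : Decidable (Spec_get_covered_terms implicant num_inputs out) := by unfold Spec_get_covered_terms; infer_instance

-- ===== CLAIM (what is proved, stated in full; the proofs are below) =====
def Claim_equal_get_covered_terms : Prop := ∀ (implicant : String) (num_inputs : Int), Dom_get_covered_terms implicant num_inputs → Spec_get_covered_terms implicant num_inputs (get_covered_terms implicant num_inputs)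

-- ===== LEMMAS AND PROOFS =====

-- positions (as Nats) of '-' in a char list
def wposN : List Char → List Nat
  | [] => []
  | c :: cs => (if c = '-' then [0] else []) ++ (wposN cs).map (· + 1)

-- fill the '-' slots of cs, in order, with the given bits
def fill : List Char → List Char → List Char
  | [], _ => []
  | c :: cs, bits =>
    if c = '-' then
      match bits with
      | b :: bs => b :: fill cs bs
      | [] => c :: fill cs []
    else c :: fill cs bits

-- f agrees with cs everywhere except possibly at '-' positions (same length)
def Agrees : List Char → List Char → Prop
  | [], [] => True
  | a :: f, c :: cs => (c ≠ '-' → a = c) ∧ Agrees f cs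
  | _, _ => False

-- the reference expansion, front recursion (first wildcard varies slowest)
def expandL : List Char → List (List Char)
  | [] => [[]]
  | c :: cs =>
    if c = '-' then ['0', '1'].flatMap (fun b => (expandL cs).map (b :: ·))
    else (expandL cs).map (c :: ·)

theorem agrees_refl (cs : List Char) : Agrees cs cs := by
  induction cs with
  | nil => trivial
  | cons c cs ih => exact ⟨fun _ => rfl, ih⟩

theorem mem_productBits_length {n : Nat} {bits : List Char}
    (h : bits ∈ productBits n) : bits.length = n := by
  induction n generalizing bits with
  | zero => simp [productBits] at h; simp [h]
  | succ n ih =>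
    simp [productBits] at h
    rcases h with ⟨t, ht, rfl⟩ | ⟨t, ht, rfl⟩ <;> simp [ih ht]

theorem agrees_fill (cs bits : List Char) : Agrees (fill cs bits) cs := by
  induction cs generalizing bits with
  | nil => trivial
  | cons c cs ih =>
    by_cases hc : c = '-'
    · cases bits with
      | nil => simp [fill, hc, Agrees, ih]
      | cons b bs => simp [fill, hc, Agrees, ih]
    · simp [fill, hc, Agrees, ih]

-- a generic foldl congruence used to swap pySetD for List.set inside the fold
theorem foldl_congr_fun {α β : Type} {f g : β → α → β} (h : ∀ b a, f b a = g b a)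
    (init : β) (l : List α) : l.foldl f init = l.foldl g init := by
  induction l generalizing init with
  | nil => rfl
  | cons x l ih => simp only [List.foldl_cons, h, ih]

theorem enumerate_filterMap_wpos (cs : List Char) (s : Int) :
    (PySem.List.enumerate cs s).filterMap
      (fun pc => if pc.2 = '-' then some pc.1 else none)
      = (wposN cs).map (fun n : Nat => s + (n : Int)) := by
  induction cs generalizing s with
  | nil => simp [PySem.List.enumerate_nil, wposN]
  | cons c cs ih =>
    have hshift : List.map (fun n : Nat => s + (n : Int)) (List.map (fun n : Nat => n + 1) (wposN cs))
        = (wposN cs).map (fun n : Nat => (s + 1) + (n : Int)) := by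
      rw [List.map_map]
      refine List.map_congr_left (fun n _ => ?_)
      simp only [Function.comp_apply]
      push_cast; ring
    rw [PySem.List.enumerate_cons, List.filterMap_cons, ih]
    by_cases hc : c = '-'
    · have hw : wposN (c :: cs) = 0 :: (wposN cs).map (· + 1) := by simp [wposN, hc]
      rw [hw, List.map_cons, hshift]
      simp [hc]
    · have hw : wposN (c :: cs) = (wposN cs).map (· + 1) := by simp [wposN, hc]
      rw [hw, hshift]
      simp [hc]

-- pushing a cons through a fold of sets at successor indices
theorem foldl_set_succ (l : List (Nat × Char)) (g : List Char) (x : Char) :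
    l.foldl (fun g ib => g.set (ib.1 + 1) ib.2) (x :: g)
      = x :: l.foldl (fun g ib => g.set ib.1 ib.2) g := by
  induction l generalizing g with
  | nil => rfl
  | cons p l ih => simp only [List.foldl_cons, List.set_cons_succ, ih]

-- substitution at the wildcard positions of cs rewrites any agreeing f into fill cs bits
theorem subst_eq_fill (cs : List Char) (f bits : List Char)
    (hagree : Agrees f cs) (hlen : bits.length = (wposN cs).length) :
    ((wposN cs).zip bits).foldl (fun g ib => g.set ib.1 ib.2) f = fill cs bits := by
  induction cs generalizing f bits with
  | nil =>
    cases f with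
    | nil => simp [wposN, fill]
    | cons a f => exact absurd hagree (by simp [Agrees])
  | cons c cs ih =>
    cases f with
    | nil => exact absurd hagree (by simp [Agrees])
    | cons a f =>
      obtain ⟨ha, hagree'⟩ := hagree
      have hmap : ∀ bs : List Char, (((wposN cs).map (· + 1)).zip bs) =
          ((wposN cs).zip bs).map (fun ib => (ib.1 + 1, ib.2)) := by
        intro bs; rw [List.zip_map_left]; rfl
      by_cases hc : c = '-'
      · subst hc
        have hw : wposN ('-' :: cs) = 0 :: (wposN cs).map (· + 1) := by simp [wposN]
        rw [hw] at hlen ⊢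
        cases bits with
        | nil => simp at hlen
        | cons b bs =>
          simp only [List.length_cons, List.length_map] at hlen
          rw [List.zip_cons_cons, List.foldl_cons, List.set_cons_zero, hmap,
            List.foldl_map, foldl_set_succ, ih f bs hagree' (by omega)]
          simp [fill]
      · have ha' := ha hc
        subst ha'
        have hw : wposN (a :: cs) = (wposN cs).map (· + 1) := by simp [wposN, hc]
        rw [hw] at hlen ⊢
        rw [hmap, List.foldl_map, foldl_set_succ,
          ih f bits hagree' (by simpa using hlen)]
        simp [fill, hc]

-- the Int-indexed pySetD fold of port A equals the Nat-indexed set fold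
theorem intfold_eq_natfold (l : List Nat) (bits : List Char) (f : List Char) :
    ((l.map (fun n : Nat => (n : Int))).zip bits).foldl
        (fun g ib => PySem.List.pySetD g ib.1 ib.2) f
      = (l.zip bits).foldl (fun g ib => g.set ib.1 ib.2) f := by
  rw [List.zip_map_left, List.foldl_map]
  refine foldl_congr_fun (fun g ib => ?_) f (l.zip bits)
  simp [Prod.map]

-- A's product fold accumulates exactly the fills, for any agreeing start state
theorem afold_eq (cs : List Char) (bl : List (List Char)) (f0 : List Char)
    (acc : List String)
    (hf0 : Agrees f0 cs)
    (hbl : ∀ bits ∈ bl, bits.length = (wposN cs).length) :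
    (bl.foldl
      (fun (st : List Char × List String) bits =>
        let f := ((wposN cs).zip bits).foldl (fun g ib => g.set ib.1 ib.2) st.1
        (f, st.2 ++ [String.mk f]))
      (f0, acc)).2 = acc ++ bl.map (fun bits => String.mk (fill cs bits)) := by
  induction bl generalizing f0 acc with
  | nil => simp
  | cons bits bl ih =>
    have hb := hbl bits (by simp)
    simp only [List.foldl_cons]
    rw [subst_eq_fill cs f0 bits hf0 hb]
    rw [ih (fill cs bits) _ (agrees_fill cs bits) (fun b hb' => hbl b (by simp [hb']))]
    simp

-- product-then-fill equals the front-recursion expansion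
theorem product_fill_eq_expand (cs : List Char) :
    (productBits (wposN cs).length).map (fill cs) = expandL cs := by
  induction cs with
  | nil => simp [wposN, productBits, expandL, fill]
  | cons c cs ih =>
    by_cases hc : c = '-'
    · subst hc
      have hw : wposN ('-' :: cs) = 0 :: (wposN cs).map (· + 1) := by simp [wposN]
      rw [hw]
      simp only [List.length_cons, List.length_map, productBits, expandL, if_pos rfl]
      rw [← ih]
      simp [List.map_flatMap, List.map_map, Function.comp_def, fill]
    · have hw : wposN (c :: cs) = (wposN cs).map (· + 1) := by simp [wposN, hc]
      rw [hw, List.length_map]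
      simp only [expandL, if_neg hc]
      rw [← ih]
      simp [List.map_map, Function.comp_def, fill, hc]

-- B's foldl over the characters expands every partial by expandL
theorem bfold_eq (cs : List Char) (ps : List (List Char)) :
    cs.foldl
      (fun (ps : List (List Char)) c =>
        if c = '-' then ps.flatMap (fun p => [p ++ ['0'], p ++ ['1']])
        else ps.map (fun p => p ++ [c])) ps
      = ps.flatMap (fun p => (expandL cs).map (p ++ ·)) := by
  induction cs generalizing ps with
  | nil => simp [expandL]
  | cons c cs ih =>
    by_cases hc : c = '-'
    · subst hc
      have he : expandL ('-' :: cs)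
          = ['0', '1'].flatMap (fun b => (expandL cs).map (b :: ·)) := by
        simp [expandL]
      rw [List.foldl_cons, if_pos rfl, ih, he, List.flatMap_assoc]
      refine congrArg (fun f => List.flatMap f ps) (funext fun p => ?_)
      simp [List.map_flatMap, List.map_map, Function.comp_def, List.append_assoc]
    · simp only [List.foldl_cons, if_neg hc, ih, expandL, if_neg hc]
      simp [List.flatMap_map, List.map_map, Function.comp_def, List.append_assoc]

-- ===== VERDICT (by name: the statement is the Claim_ definition above) =====
theorem get_covered_terms_spec : Claim_equal_get_covered_terms := by
  intro implicant num_inputs _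
  unfold Spec_get_covered_terms get_covered_terms get_covered_terms_alt
  set cs := implicant.toList with hcs
  have h0 : (wposN cs).map (fun n : Nat => (0 : Int) + (n : Int))
      = (wposN cs).map (fun n : Nat => (n : Int)) :=
    List.map_congr_left (fun n _ => by omega)
  simp only [enumerate_filterMap_wpos, h0, List.length_map]
  have congr1 :
      (productBits (wposN cs).length).foldl
        (fun (st : List Char × List String) bits =>
          let f := (((wposN cs).map (fun n : Nat => (n : Int))).zip bits).foldl
              (fun g ib => PySem.List.pySetD g ib.1 ib.2) st.1
          (f, st.2 ++ [String.mk f]))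
        (cs, [])
      = (productBits (wposN cs).length).foldl
        (fun (st : List Char × List String) bits =>
          let f := ((wposN cs).zip bits).foldl (fun g ib => g.set ib.1 ib.2) st.1
          (f, st.2 ++ [String.mk f]))
        (cs, []) := by
    refine foldl_congr_fun (fun st bits => ?_) _ _
    simp only [intfold_eq_natfold]
  rw [congr1]
  rw [afold_eq cs (productBits (wposN cs).length) cs []
    (agrees_refl cs) (fun bits hb => mem_productBits_length hb)]
  rw [bfold_eq cs [[]], ← product_fill_eq_expand cs]
  simp [List.map_map, Function.comp_def]
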